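-- pv_equiv track=rewrite | github.com/metal3-io/metal3-dev-env | tests/roles/run_tests/filter_plugins/k8s_fields.py | k8s_backup
-- ===== SOURCE A (Python) =====
-- import copy
--
-- def k8s_backup(resources):
--     """
--     Take a backup of k8s resources by stripping away problematic fields.
--     Fields that are automatically created and should normally not be touched
--     will be removed so that the resources can safely be restored from this
--     "backup".
--     Removed fields under .metadata: uid, managedFields, resourceVersion,
--     creationTimestamp
--     """
--     unwanted_metadata_fields = ["uid", "resourceVersion", "creationTimestamp",
--                                 "managedFields"]
--
--     filtered = copy.deepcopy(resources)
--     for resource in filtered: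
--         for field in unwanted_metadata_fields:
--             if "metadata" in resource and field in resource["metadata"]:
--                 del resource["metadata"][field]
--
--     return filtered
-- ===== SOURCE B (Python) =====
-- def k8s_backup(resources):
--     unwanted = {"uid", "resourceVersion", "creationTimestamp", "managedFields"}
--     filtered = []
--     for resource in resources:
--         resource = dict(resource)
--         if "metadata" in resource:
--             resource["metadata"] = {k: v for k, v in resource["metadata"].items()
--                                     if k not in unwanted}
--         filtered.append(resource)
--     return filtered
-- ===== Notes on version B (the rewrite author's own statement) =====
-- stated objective: simpler
-- what changed: B rebuilds each resource's metadata once with a dict comprehension filtering keys against the unwanted set, instead of A's inner loop over the four field names with repeated membership tests and del.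
import Mathlib
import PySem

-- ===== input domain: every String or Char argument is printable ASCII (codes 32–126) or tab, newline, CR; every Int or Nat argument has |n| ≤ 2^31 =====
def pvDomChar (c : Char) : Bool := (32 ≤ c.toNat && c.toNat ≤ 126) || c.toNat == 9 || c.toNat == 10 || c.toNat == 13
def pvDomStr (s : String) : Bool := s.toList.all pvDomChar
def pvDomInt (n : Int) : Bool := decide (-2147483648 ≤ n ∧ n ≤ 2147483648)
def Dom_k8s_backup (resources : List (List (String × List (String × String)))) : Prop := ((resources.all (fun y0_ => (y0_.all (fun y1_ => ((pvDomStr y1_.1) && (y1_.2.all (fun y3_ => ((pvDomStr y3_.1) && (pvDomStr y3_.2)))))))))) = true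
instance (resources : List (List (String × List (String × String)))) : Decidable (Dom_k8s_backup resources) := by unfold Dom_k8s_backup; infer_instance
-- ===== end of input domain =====

-- B filters each metadata dict once against the unwanted-field set (dict comprehension)
-- instead of A's inner loop over the four field names with del; equivalence is about the
-- return value (neither program mutates its argument).

-- shared assoc-list primitives for the Python-dict operations:
-- first-match lookup (d[k] / 'k in d') and in-place overwrite of an existing key (d[k] = v)
def pvLookup (r : List (String × List (String × String))) (k : String) :
    Option (List (String × String)) :=
  (r.find? (fun p => p.1 == k)).map (·.2)

def pvSetFirst (r : List (String × List (String × String))) (k : String)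
    (v : List (String × String)) : List (String × List (String × String)) :=
  match r with
  | [] => []
  | p :: rest => if p.1 == k then (k, v) :: rest else p :: pvSetFirst rest k v

-- ===== PORT A =====
def pvUnwanted : List String := ["uid", "resourceVersion", "creationTimestamp", "managedFields"]

-- one inner-loop iteration of A: if "metadata" in resource and field in resource["metadata"]: del
def pvDelStep (r : List (String × List (String × String))) (field : String) :
    List (String × List (String × String)) :=
  match pvLookup r "metadata" with
  | none => r
  | some m =>
      if m.any (fun q => q.1 == field) then
        pvSetFirst r "metadata" (m.filter (fun q => q.1 != field))
      else r

def k8s_backup (resources : List (List (String × List (String × String)))) :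
    List (List (String × List (String × String))) :=
  resources.map (fun resource => pvUnwanted.foldl pvDelStep resource)

-- ===== PORT B =====
def k8s_backup_alt (resources : List (List (String × List (String × String)))) :
    List (List (String × List (String × String))) :=
  resources.map (fun resource =>
    match pvLookup resource "metadata" with
    | none => resource
    | some m =>
        pvSetFirst resource "metadata"
          (m.filter (fun q => !(pvUnwanted.contains q.1))))

-- ===== PRECONDITION & SPEC =====
def Spec_k8s_backup (resources : List (List (String × List (String × String)))) (out : List (List (String × List (String × String)))) : Prop := out = k8s_backup_alt resources
instance (resources : List (List (String × List (String × String)))) (out : List (List (String × List (String × String)))) : Decidable (Spec_k8s_backup resources out) := by unfold Spec_k8s_backup; infer_instance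

-- ===== CLAIM (what is proved, stated in full; the proofs are below) =====
def Claim_equal_k8s_backup : Prop := ∀ (resources : List (List (String × List (String × String)))), Dom_k8s_backup resources → Spec_k8s_backup resources (k8s_backup resources)

-- ===== LEMMAS AND PROOFS =====

theorem pvLookup_setFirst (r : List (String × List (String × String))) (k : String)
    (v m : List (String × String)) (h : pvLookup r k = some m) :
    pvLookup (pvSetFirst r k v) k = some v := by
  induction r with
  | nil => simp [pvLookup] at h
  | cons p rest ih =>
      by_cases hk : (p.1 == k) = true
      · simp [pvLookup, pvSetFirst, hk]
      · have hk' : (p.1 == k) = false := by simpa using hk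
        have e1 : pvSetFirst (p :: rest) k v = p :: pvSetFirst rest k v := by
          simp [pvSetFirst, hk']
        rw [e1]
        unfold pvLookup at h ⊢
        rw [List.find?_cons_of_neg (by simp [hk'])] at h ⊢
        exact ih h

theorem pvSetFirst_setFirst (r : List (String × List (String × String))) (k : String)
    (v w : List (String × String)) :
    pvSetFirst (pvSetFirst r k v) k w = pvSetFirst r k w := by
  induction r with
  | nil => rfl
  | cons p rest ih =>
      by_cases hk : (p.1 == k) = true
      · simp [pvSetFirst, hk]
      · have hk' : (p.1 == k) = false := by simpa using hk
        simp [pvSetFirst, hk', ih]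

theorem pvSetFirst_self (r : List (String × List (String × String))) (k : String)
    (m : List (String × String)) (h : pvLookup r k = some m) :
    pvSetFirst r k m = r := by
  induction r with
  | nil => simp [pvLookup] at h
  | cons p rest ih =>
      by_cases hk : (p.1 == k) = true
      · unfold pvLookup at h
        rw [List.find?_cons_of_pos (by simpa using hk)] at h
        have hp1 : p.1 = k := by simpa [beq_iff_eq] using hk
        have hp2 : p.2 = m := by simpa using h
        simp [pvSetFirst, ← hp1, ← hp2]
      · have hk' : (p.1 == k) = false := by simpa using hk
        unfold pvLookup at h
        rw [List.find?_cons_of_neg (by simp [hk'])] at h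
        simp [pvSetFirst, hk', ih h]

theorem pvDelStep_eq (r : List (String × List (String × String))) (field : String)
    (m : List (String × String)) (h : pvLookup r "metadata" = some m) :
    pvDelStep r field = pvSetFirst r "metadata" (m.filter (fun q => q.1 != field)) := by
  unfold pvDelStep
  rw [h]
  by_cases ha : (m.any (fun q => q.1 == field)) = true
  · simp [ha]
  · have hfil : m.filter (fun q => q.1 != field) = m := by
      apply List.filter_eq_self.mpr
      intro q hq
      simp only [List.any_eq_true, not_exists] at ha
      simp only [bne_iff_ne, ne_eq]
      intro hcontra
      exact ha q ⟨hq, by simp [hcontra]⟩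
    rw [hfil, pvSetFirst_self r _ m h]
    simp [ha]

theorem resource_eq (r : List (String × List (String × String))) :
    pvUnwanted.foldl pvDelStep r =
      (match pvLookup r "metadata" with
       | none => r
       | some m =>
           pvSetFirst r "metadata" (m.filter (fun q => !(pvUnwanted.contains q.1)))) := by
  cases h : pvLookup r "metadata" with
  | none =>
      have hstep : ∀ f, pvDelStep r f = r := by
        intro f; unfold pvDelStep; rw [h]
      simp [pvUnwanted, List.foldl, hstep]
  | some m =>
      have l1 := pvLookup_setFirst r "metadata" (m.filter (fun q => q.1 != "uid")) m h
      simp only [pvUnwanted, List.foldl]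
      rw [pvDelStep_eq r "uid" m h]
      rw [pvDelStep_eq _ "resourceVersion" _ l1, pvSetFirst_setFirst]
      have l2 := pvLookup_setFirst r "metadata"
        ((m.filter (fun q => q.1 != "uid")).filter (fun q => q.1 != "resourceVersion")) m h
      rw [pvDelStep_eq _ "creationTimestamp" _ l2, pvSetFirst_setFirst]
      have l3 := pvLookup_setFirst r "metadata"
        (((m.filter (fun q => q.1 != "uid")).filter (fun q => q.1 != "resourceVersion")).filter
          (fun q => q.1 != "creationTimestamp")) m h
      rw [pvDelStep_eq _ "managedFields" _ l3, pvSetFirst_setFirst]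
      congr 1
      simp only [List.filter_filter]
      apply List.filter_congr
      intro q _
      by_cases h1 : q.1 = "uid" <;> by_cases h2 : q.1 = "resourceVersion" <;>
        by_cases h3 : q.1 = "creationTimestamp" <;> by_cases h4 : q.1 = "managedFields" <;>
        simp [h1, h2, h3, h4]

-- ===== VERDICT (by name: the statement is the Claim_ definition above) =====
theorem k8s_backup_spec : Claim_equal_k8s_backup := by
  intro resources _
  unfold Spec_k8s_backup k8s_backup k8s_backup_alt
  apply List.map_congr_left
  intro r _
  exact resource_eq r
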